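-- pv_equiv track=rewrite | github.com/huniversal/Python_Study | CodingTest_1116.py | solution
-- ===== SOURCE A (Python) =====
-- def solution(n):
--   count = 0
--   while n >= 0:
--     if n % 5 == 0:
--       count += (n // 5)
--       return count
--     n -= 3
--     count += 1
--   else:
--     return (-1)
-- ===== SOURCE B (Python) =====
-- def solution(n):
--     # closed form: least count of 3s with 3*a ≡ n (mod 5) is a0 = (2*n) % 5
--     a0 = (2 * n) % 5
--     if n >= 0 and n - 3 * a0 >= 0:
--         return a0 + (n - 3 * a0) // 5
--     return -1
-- ===== Notes on version B (the rewrite author's own statement) =====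
-- stated objective: simpler
-- what changed: Replaced the greedy subtract-by-three loop with a closed-form modular-arithmetic formula: the least count of threes is determined directly from the residue, after which the remainder is covered by a single integer division.
import Mathlib
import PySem

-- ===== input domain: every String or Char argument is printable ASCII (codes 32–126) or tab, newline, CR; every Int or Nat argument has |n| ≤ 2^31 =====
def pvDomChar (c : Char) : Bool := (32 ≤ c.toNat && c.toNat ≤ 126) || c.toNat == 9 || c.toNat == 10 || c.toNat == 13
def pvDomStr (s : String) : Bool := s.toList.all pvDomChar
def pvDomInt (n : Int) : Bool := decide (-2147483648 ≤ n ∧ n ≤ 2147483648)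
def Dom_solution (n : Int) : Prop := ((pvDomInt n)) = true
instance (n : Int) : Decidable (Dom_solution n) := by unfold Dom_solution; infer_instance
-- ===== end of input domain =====

-- ===== PORT A =====
-- B replaces A's greedy subtract-3 loop by a closed-form modular formula (objective: simpler).
-- literal port of A's while loop: state (n, count); terminates since n drops by 3 while ≥ 0
def solutionGo (n : Int) (count : Int) : Int :=
  if h : n ≥ 0 then
    if hm : PySem.Int.mod n 5 = 0 then count + PySem.Int.floordiv n 5
    else solutionGo (n - 3) (count + 1)
  else -1
termination_by n.toNat
decreasing_by
  have h5 : PySem.Int.mod n 5 = n % 5 := PySem.Int.mod_eq_emod_of_pos (by omega)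
  rw [h5] at hm
  omega

def solution (n : Int) : Int := solutionGo n 0

-- ===== PORT B =====
def solution_alt (n : Int) : Int :=
  let a0 := PySem.Int.mod (2 * n) 5
  if n ≥ 0 ∧ n - 3 * a0 ≥ 0 then a0 + PySem.Int.floordiv (n - 3 * a0) 5
  else -1

-- ===== PRECONDITION & SPEC =====
def Spec_solution (n : Int) (out : Int) : Prop := out = solution_alt n
instance (n : Int) (out : Int) : Decidable (Spec_solution n out) := by unfold Spec_solution; infer_instance

-- ===== CLAIM (what is proved, stated in full; the proofs are below) =====
def Claim_equal_solution : Prop := ∀ (n : Int), Dom_solution n → Spec_solution n (solution n)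

-- ===== LEMMAS AND PROOFS =====

theorem mod5_eq (m : Int) : PySem.Int.mod m 5 = m % 5 :=
  PySem.Int.mod_eq_emod_of_pos (by omega)

theorem floordiv5_eq (m : Int) : PySem.Int.floordiv m 5 = m / 5 :=
  PySem.Int.floordiv_eq_ediv_of_pos (by omega)

theorem solutionGo_eq (n count : Int) :
    solutionGo n count = if solution_alt n = -1 then -1 else count + solution_alt n := by
  induction n, count using solutionGo.induct with
  | case1 n count hn hmod =>
    rw [solutionGo, dif_pos hn, dif_pos hmod]
    rw [mod5_eq] at hmod
    simp only [solution_alt, mod5_eq, floordiv5_eq]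
    split_ifs <;> omega
  | case2 n count hn hmod ih =>
    rw [solutionGo, dif_pos hn, dif_neg hmod, ih]
    rw [mod5_eq] at hmod
    have he : ¬ (2 * n) % 5 = 0 := by omega
    have hf : (2 * (n - 3)) % 5 = (2 * n) % 5 - 1 := by omega
    have hnum : (n - 3) - 3 * ((2 * (n - 3)) % 5) = n - 3 * ((2 * n) % 5) := by omega
    simp only [solution_alt, mod5_eq, floordiv5_eq]
    rw [hnum]
    split_ifs <;> omega
  | case3 n count hn =>
    rw [solutionGo, dif_neg hn]
    simp only [solution_alt, mod5_eq, floordiv5_eq]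
    split_ifs <;> omega

-- ===== VERDICT (by name: the statement is the Claim_ definition above) =====
theorem solution_spec : Claim_equal_solution := by
  intro n _
  unfold Spec_solution solution
  rw [solutionGo_eq]
  split <;> omega
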